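-- pv_equiv track=rewrite | github.com/isThiago/com_dados | message.py | decode_2b1q
-- ===== SOURCE A (Python) =====
-- def decode_2b1q(signal):
--     # Converte sinal digital para dados digitais.
--     binary = []
--     is_prev_positive = True
--     for el in signal:
--         if is_prev_positive:
--             if el == 1:
--                 binary.extend([0, 0])
--             elif el == 3:
--                 binary.extend([0, 1])
--             if el == -1:
--                 binary.extend([1, 0])
--             elif el == -3:
--                 binary.extend([1, 1])
--         else:
--             if el == 1:
--                 binary.extend([1, 0])
--             elif el == 3:
--                 binary.extend([1, 1])
--             if el == -1:
--                 binary.extend([0, 0])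
--             elif el == -3:
--                 binary.extend([0, 1])
--         is_prev_positive = el > 0
--     return binary
-- ===== SOURCE B (Python) =====
-- def decode_2b1q(sig):
--     # Staged decoding: precompute the transition-bit track back-to-front
--     # (each slot from the local sign change alone, no running state), then
--     # filter valid symbols and interleave the track with the magnitude bit.
--     n = len(sig)
--     first = [0] * n
--     for i in range(n - 1, 0, -1):
--         first[i] = 1 if (sig[i] > 0) != (sig[i - 1] > 0) else 0
--     if n > 0:
--         first[0] = 1 if sig[0] <= 0 else 0
--     out = []
--     for i in range(n):
--         el = sig[i]
--         if el in (-3, -1, 1, 3):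
--             out.append(first[i])
--             out.append(1 if el in (3, -3) else 0)
--     return out
-- ===== Notes on version B (the rewrite author's own statement) =====
-- stated objective: alternative
-- what changed: Replaces A's single stateful pass with an eight-way polarity/value branch table by a staged decoder: a transition-bit track is precomputed back-to-front into an index-addressed array from local sign changes (no running polarity state), and a second pass filters valid symbols and interleaves the track with the magnitude bit.
import Mathlib
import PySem

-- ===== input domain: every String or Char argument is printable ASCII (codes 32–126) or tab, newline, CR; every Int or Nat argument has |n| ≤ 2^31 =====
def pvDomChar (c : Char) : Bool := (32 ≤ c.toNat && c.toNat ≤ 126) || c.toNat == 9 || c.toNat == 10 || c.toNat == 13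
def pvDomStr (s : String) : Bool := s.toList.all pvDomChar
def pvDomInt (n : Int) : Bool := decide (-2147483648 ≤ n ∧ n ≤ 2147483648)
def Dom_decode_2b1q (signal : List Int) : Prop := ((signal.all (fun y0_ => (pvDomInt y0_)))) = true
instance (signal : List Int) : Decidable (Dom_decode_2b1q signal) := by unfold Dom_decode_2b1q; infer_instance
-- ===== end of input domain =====

-- B replaces A's stateful branch-table pass by a staged decoder (precomputed
-- transition-bit track filled back-to-front, then a filtering/interleaving pass);
-- return values are identical.

-- ===== PORT A =====
def decode_2b1q (signal : List Int) : List Int :=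
  (signal.foldl (fun (st : List Int × Bool) el =>
    let binary := st.1
    let binary :=
      if st.2 then
        let binary := if el = 1 then binary ++ [0, 0]
          else if el = 3 then binary ++ [0, 1] else binary
        if el = -1 then binary ++ [1, 0]
        else if el = -3 then binary ++ [1, 1] else binary
      else
        let binary := if el = 1 then binary ++ [1, 0]
          else if el = 3 then binary ++ [1, 1] else binary
        if el = -1 then binary ++ [0, 0]
        else if el = -3 then binary ++ [0, 1] else binary
    (binary, decide (el > 0))) ([], true)).1

-- ===== PORT B =====
-- first[i] = 1 if (signal[i] > 0) != (signal[i-1] > 0) else 0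
-- (loop indices satisfy 1 ≤ i < len signal, so pyGetD/pySetD are exact here)
def bBit (signal : List Int) (i : Int) : Int :=
  if decide (PySem.List.pyGetD signal i 0 > 0) != decide (PySem.List.pyGetD signal (i - 1) 0 > 0)
  then 1 else 0

-- Stage 1: the transition-bit track, filled back-to-front, plus the first slot.
def bTrack (signal : List Int) : List Int :=
  let n : Int := PySem.List.len signal
  let first := (PySem.List.pyRange (n - 1) 0 (-1)).foldl
    (fun f i => PySem.List.pySetD f i (bBit signal i)) (PySem.List.pyRepeat [0] n)
  if n > 0 then PySem.List.pySetD first 0 (if PySem.List.pyGetD signal 0 0 ≤ 0 then 1 else 0)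
  else first

-- Stage 2: keep valid symbols, interleaving the track with the magnitude bit.
def decode_2b1q_alt (signal : List Int) : List Int :=
  let first := bTrack signal
  (PySem.List.pyRange 0 (PySem.List.len signal) 1).foldl
    (fun out i =>
      let el := PySem.List.pyGetD signal i 0
      if el = -3 ∨ el = -1 ∨ el = 1 ∨ el = 3 then
        out ++ [PySem.List.pyGetD first i 0, if el = 3 ∨ el = -3 then 1 else 0]
      else out) []

-- ===== PRECONDITION & SPEC =====
def Spec_decode_2b1q (signal : List Int) (out : List Int) : Prop := out = decode_2b1q_alt signal
instance (signal : List Int) (out : List Int) : Decidable (Spec_decode_2b1q signal out) := by unfold Spec_decode_2b1q; infer_instance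

-- ===== CLAIM (what is proved, stated in full; the proofs are below) =====
def Claim_equal_decode_2b1q : Prop := ∀ (signal : List Int), Dom_decode_2b1q signal → Spec_decode_2b1q signal (decode_2b1q signal)

-- ===== LEMMAS AND PROOFS =====

-- the per-symbol block of the common zip formulation both ports are reduced to
def pvBlk (pe : Int × Int) : List Int :=
  if pe.2 = -3 ∨ pe.2 = -1 ∨ pe.2 = 1 ∨ pe.2 = 3 then
    [if decide (pe.2 > 0) != decide (pe.1 > 0) then 1 else 0,
     if pe.2 = 3 ∨ pe.2 = -3 then 1 else 0]
  else []

-- the polarity reference seen by position j (initial polarity p at j = 0)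
def pvPrev (p : Int) (sig : List Int) (j : Nat) : Int :=
  if j = 0 then p else sig.getD (j - 1) 0

theorem decode_loop_eq (signal : List Int) : ∀ (p : Int) (acc : List Int),
    (signal.foldl (fun (st : List Int × Bool) el =>
      let binary := st.1
      let binary :=
        if st.2 then
          let binary := if el = 1 then binary ++ [0, 0]
            else if el = 3 then binary ++ [0, 1] else binary
          if el = -1 then binary ++ [1, 0]
          else if el = -3 then binary ++ [1, 1] else binary
        else
          let binary := if el = 1 then binary ++ [1, 0]
            else if el = 3 then binary ++ [1, 1] else binary
          if el = -1 then binary ++ [0, 0]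
          else if el = -3 then binary ++ [0, 1] else binary
      (binary, decide (el > 0))) (acc, decide (p > 0))).1
    = acc ++ ((p :: signal).zip signal).flatMap pvBlk := by
  induction signal with
  | nil => simp
  | cons el rest ih =>
    intro p acc
    simp only [List.foldl_cons, List.zip_cons_cons, List.flatMap_cons]
    rw [ih el]
    rw [← List.append_assoc]
    congr 1
    by_cases h1 : el = 1
    · subst h1; by_cases hp : p > 0 <;> simp [pvBlk, hp]
    by_cases h3 : el = 3
    · subst h3; by_cases hp : p > 0 <;> simp [pvBlk, hp]
    by_cases hn1 : el = -1
    · subst hn1; by_cases hp : p > 0 <;> simp [pvBlk, hp]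
    by_cases hn3 : el = -3
    · subst hn3; by_cases hp : p > 0 <;> simp [pvBlk, hp]
    by_cases hp : p > 0 <;> simp [pvBlk, h1, h3, hn1, hn3, hp]

theorem length_foldl_pySetD (v : Int → Int) :
    ∀ (L : List Int) (f : List Int),
      (L.foldl (fun f i => PySem.List.pySetD f i (v i)) f).length = f.length := by
  intro L
  induction L with
  | nil => intro f; rfl
  | cons a L ih =>
    intro f
    simp only [List.foldl_cons]
    rw [ih, PySem.List.length_pySetD]

theorem foldl_pySetD_getD (v : Int → Int) :
    ∀ (L : List Int) (f : List Int), (∀ i ∈ L, 0 ≤ i) → ∀ (j : Nat), j < f.length →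
      (L.foldl (fun f i => PySem.List.pySetD f i (v i)) f).getD j 0 =
        if (j : Int) ∈ L then v j else f.getD j 0 := by
  intro L
  induction L with
  | nil => intro f _ j _; simp
  | cons a L ih =>
    intro f hpos j hj
    simp only [List.foldl_cons]
    rw [PySem.List.pySetD_of_nonneg _ _ (hpos a (by simp))]
    rw [ih (f.set a.toNat (v a)) (fun i hi => hpos i (by simp [hi])) j (by simpa using hj)]
    by_cases hmem : (j : Int) ∈ L
    · simp [hmem]
    · by_cases hja : (j : Int) = a
      · have h0a : (0:Int) ≤ a := hpos a (by simp)
        have hset : (f.set a.toNat (v a)).getD j 0 = v a := by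
          rw [List.getD_eq_getElem _ _ (by simpa using hj), List.getElem_set]
          simp [show a.toNat = j by omega]
        rw [hset, if_pos (List.mem_cons.mpr (Or.inl hja)), hja]
        split <;> rfl
      · have h0a : (0:Int) ≤ a := hpos a (by simp)
        have hne : a.toNat ≠ j := by intro h; exact hja (by omega)
        simp only [hmem, if_false, List.mem_cons, hja, false_or, if_false]
        rw [List.getD_eq_getElem _ _ (by simpa using hj), List.getElem_set,
          if_neg hne, List.getD_eq_getElem _ _ hj]

-- track characterization: each slot holds the closed-form transition bit
theorem bTrack_getD (signal : List Int) (j : Nat) (hj : j < signal.length) :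
    (bTrack signal).getD j 0 =
      if decide (signal.getD j 0 > 0) != decide (pvPrev 1 signal j > 0) then 1 else 0 := by
  have hn : (0:Int) < PySem.List.len signal := by
    simp only [PySem.List.len_eq]; exact_mod_cast Nat.zero_lt_of_lt hj
  simp only [bTrack]
  rw [if_pos hn]
  rw [PySem.List.pySetD_of_nonneg _ _ (by norm_num : (0:Int) ≤ 0)]
  have hlenfold : ((PySem.List.pyRange (PySem.List.len signal - 1) 0 (-1)).foldl
      (fun f i => PySem.List.pySetD f i (bBit signal i))
      (PySem.List.pyRepeat [0] (PySem.List.len signal))).length = signal.length := by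
    rw [length_foldl_pySetD (bBit signal), PySem.List.pyRepeat_singleton]
    simp
  have hgetset : ∀ (l : List Int) (c : Int), j < l.length →
      (l.set (0:Int).toNat c).getD j 0 = if j = 0 then c else l.getD j 0 := by
    intro l c hlt
    rw [List.getD_eq_getElem _ _ (by simpa using hlt), List.getElem_set]
    by_cases h : j = 0
    · simp [h]
    · simp [h, Ne.symm h, List.getElem?_eq_getElem hlt]
  rw [hgetset _ _ (by rw [hlenfold]; exact hj)]
  by_cases h0 : j = 0
  · subst h0
    rw [if_pos rfl, PySem.List.pyGetD_zero]
    have hp : pvPrev 1 signal 0 = 1 := rfl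
    rw [hp]
    generalize signal.getD 0 0 = x
    by_cases hs : x > 0
    · rw [if_neg (by omega), if_neg (by simp [hs])]
    · rw [if_pos (by omega), if_pos (by simp [hs])]
  · rw [if_neg h0]
    rw [foldl_pySetD_getD (bBit signal) _ _
      (by intro i hi; rw [PySem.List.mem_pyRange_neg_one] at hi; omega) j
      (by rw [PySem.List.pyRepeat_singleton]; simp; omega)]
    have hmem : ((j:Int)) ∈ PySem.List.pyRange (PySem.List.len signal - 1) 0 (-1) := by
      rw [PySem.List.mem_pyRange_neg_one]
      simp only [PySem.List.len_eq]
      omega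
    rw [if_pos hmem]
    simp only [bBit]
    have hc : ((j:Int) - 1) = ((j - 1 : Nat) : Int) := by omega
    rw [hc, PySem.List.pyGetD_natCast, PySem.List.pyGetD_natCast]
    simp [pvPrev, h0]

theorem flatMap_congr_mem {α β : Type} (l : List α) (f g : α → List β)
    (h : ∀ x ∈ l, f x = g x) : l.flatMap f = l.flatMap g := by
  induction l with
  | nil => rfl
  | cons a l ih =>
    simp only [List.flatMap_cons, h a (by simp), ih (fun x hx => h x (by simp [hx]))]

-- the index-based flatMap equals the zip formulation
theorem range_flatMap_eq_zip :
    ∀ (sig : List Int) (p : Int),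
      (List.range sig.length).flatMap
        (fun j => pvBlk (pvPrev p sig j, sig.getD j 0))
      = ((p :: sig).zip sig).flatMap pvBlk := by
  intro sig
  induction sig with
  | nil => intro p; simp
  | cons a rest ih =>
    intro p
    simp only [List.length_cons]
    rw [List.range_succ_eq_map]
    simp only [List.flatMap_cons, List.zip_cons_cons, List.flatMap_map]
    congr 1
    rw [← ih a]
    apply flatMap_congr_mem
    intro j hj
    cases j with
    | zero => simp [pvPrev]
    | succ m => simp [pvPrev]

-- B's second pass as a flatMap over indices
theorem alt_flat (signal : List Int) : ∀ (l : List Nat) (acc : List Int),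
    List.foldl (fun out i =>
      if PySem.List.pyGetD signal i 0 = -3 ∨ PySem.List.pyGetD signal i 0 = -1 ∨
         PySem.List.pyGetD signal i 0 = 1 ∨ PySem.List.pyGetD signal i 0 = 3 then
        out ++ [PySem.List.pyGetD (bTrack signal) i 0,
                if PySem.List.pyGetD signal i 0 = 3 ∨ PySem.List.pyGetD signal i 0 = -3 then 1 else 0]
      else out) acc (List.map (fun (k : Nat) => (k : Int)) l)
    = acc ++ l.flatMap (fun k =>
        if signal.getD k 0 = -3 ∨ signal.getD k 0 = -1 ∨ signal.getD k 0 = 1 ∨ signal.getD k 0 = 3 then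
          [(bTrack signal).getD k 0, if signal.getD k 0 = 3 ∨ signal.getD k 0 = -3 then 1 else 0]
        else []) := by
  intro l
  induction l with
  | nil => intro acc; simp
  | cons k l ih =>
    intro acc
    simp only [List.map_cons, List.foldl_cons, List.flatMap_cons]
    rw [ih]
    rw [← List.append_assoc]
    congr 1
    simp only [PySem.List.pyGetD_natCast]
    split <;> simp

theorem alt_eq (signal : List Int) :
    decode_2b1q_alt signal = ((1 :: signal).zip signal).flatMap pvBlk := by
  simp only [decode_2b1q_alt, PySem.List.len_eq]
  rw [PySem.List.pyRange_zero_natCast, alt_flat, List.nil_append]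
  rw [← range_flatMap_eq_zip signal 1]
  apply flatMap_congr_mem
  intro j hj
  have hjlt : j < signal.length := List.mem_range.mp hj
  rw [bTrack_getD signal j hjlt]
  simp [pvBlk]

-- ===== VERDICT (by name: the statement is the Claim_ definition above) =====
theorem decode_2b1q_spec : Claim_equal_decode_2b1q := by
  intro signal _
  show decode_2b1q signal = decode_2b1q_alt signal
  rw [alt_eq]
  simpa [decode_2b1q] using decode_loop_eq signal 1 []
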